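-- pv_equiv track=rewrite | github.com/omarstfa/PyFTE | components/modules/cutsets.py | _get_index_of_number_before
-- ===== SOURCE A (Python) =====
-- def _get_index_of_number_before(queue, number):
--     """
--     Gets the index of the number that is right before the number passed in as an argument
--     in the method.
--     :param queue: List of numbers
--     :param number: The number to find the index of its lower neighbor, so the index of the
--     number before number
--     :return: The index of the previous number or the index of number if it matches a number
--     in the queue
--     """
--     index = -1
--     # First checks if number is smaller then the first number in series
--     if number < queue[0]:
--         index = -1
--     # Second checks if number is greater then the last number in series
--     elif number > queue[-1]:
--         index = len(queue) - 1
--     # Then checks the rest of the numbers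
--     else:
--         for i in range(len(queue)):
--             if number < queue[i]:
--                 index = i - 1
--                 break
--     return index
-- ===== SOURCE B (Python) =====
-- def _get_index_of_number_before(queue, number):
--     # bisect_right (hand-written binary search; a.py imports nothing) minus 1:
--     # index of the last element <= number in the ascending queue, -1 if none.
--     lo, hi = 0, len(queue)
--     while lo < hi:
--         mid = (lo + hi) // 2
--         if number < queue[mid]:
--             hi = mid
--         else:
--             lo = mid + 1
--     return lo - 1
-- ===== Notes on version B (the rewrite author's own statement) =====
-- stated objective: alternative
-- what changed: A's branchy linear scan is replaced by a branch-free binary search (bisect_right minus 1), O(log n) on the ascending queues of Pre_; Pre_ keeps non-empty queues that are ascending (the docstring's series) or where number is below every element or at/above every element, excluding the remaining unsorted queues on which the two search strategies legitimately diverge.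
-- intended difference: When number equals the last (largest) element of the sorted queue, A's loop never breaks and it returns -1, while B returns len(queue)-1, the index of the matching number, which is what the docstring ('the index of number if it matches a number in the queue') intends. — e.g. on _get_index_of_number_before([1, 3, 5], 5): A returns -1, B returns 2
-- outside the precondition, e.g. on _get_index_of_number_before([3, 1, 2], 2): A returns -1, B returns 2
import Mathlib
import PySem

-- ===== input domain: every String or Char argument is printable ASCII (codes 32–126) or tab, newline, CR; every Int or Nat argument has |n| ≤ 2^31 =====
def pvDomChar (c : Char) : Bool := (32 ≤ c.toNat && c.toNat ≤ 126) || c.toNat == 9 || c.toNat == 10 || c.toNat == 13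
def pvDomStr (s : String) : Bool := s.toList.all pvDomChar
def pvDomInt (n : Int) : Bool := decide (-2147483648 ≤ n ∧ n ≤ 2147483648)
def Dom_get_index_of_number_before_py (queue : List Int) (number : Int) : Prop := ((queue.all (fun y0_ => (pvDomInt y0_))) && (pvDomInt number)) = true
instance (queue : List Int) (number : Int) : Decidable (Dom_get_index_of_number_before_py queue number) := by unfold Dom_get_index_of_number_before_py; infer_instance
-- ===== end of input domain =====

-- B replaces A's linear scan with a binary search (bisect_right - 1) on the sorted queue; on the
-- corner number = last element A returns -1 and B returns the matching index (see D_ below).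

-- ===== PORT A =====
-- 'for i in range(len(queue)): if number < queue[i]: index = i - 1; break' starting at index i
def pvALoop (queue : List Int) (number : Int) (i : Nat) : Int :=
  if _ : i < queue.length then
    if number < queue.getD i 0 then (i : Int) - 1
    else pvALoop queue number (i + 1)
  else -1
termination_by queue.length - i

def get_index_of_number_before_py (queue : List Int) (number : Int) : Int :=
  -- index = -1; if/elif on queue[0], queue[-1]; else the break-loop (index stays -1 if no break)
  if number < (PySem.List.pyGet? queue 0).getD 0 then -1
  else if number > (PySem.List.pyGet? queue (-1)).getD 0 then (queue.length : Int) - 1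
  else pvALoop queue number 0

-- ===== PORT B =====
-- 'while lo < hi: mid = (lo+hi)//2; if number < queue[mid]: hi = mid else: lo = mid+1'
def pvBSearch (queue : List Int) (number : Int) (lo hi : Nat) : Nat :=
  if _ : lo < hi then
    let mid := (lo + hi) / 2
    if number < queue.getD mid 0 then pvBSearch queue number lo mid
    else pvBSearch queue number (mid + 1) hi
  else lo
termination_by hi - lo

def get_index_of_number_before_py_alt (queue : List Int) (number : Int) : Int :=
  (pvBSearch queue number 0 queue.length : Int) - 1

-- ===== PRECONDITION & SPEC =====
-- Pre_ excludes the empty queue (A raises IndexError at queue[0]) and those unsorted queues on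
-- which A's linear scan and B's binary search legitimately diverge: kept are ascending queues
-- (the docstring's 'series', the natural domain) plus, whatever the order, the queues with
-- number below every element or at/above every element, where the two strategies agree.
def Pre_get_index_of_number_before_py (queue : List Int) (number : Int) : Prop :=
  queue ≠ [] ∧ (queue.Pairwise (· ≤ ·) ∨ (∀ x ∈ queue, number < x) ∨ (∀ x ∈ queue, x ≤ number))
instance (queue : List Int) (number : Int) : Decidable (Pre_get_index_of_number_before_py queue number) := by unfold Pre_get_index_of_number_before_py; infer_instance
def pvWitness_get_index_of_number_before_py : List Int × Int := ([1, 3, 5], 4)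

-- When number equals the last (largest) element, A's loop never breaks and A returns -1,
-- while B returns len(queue)-1, the index of the matching number, which the docstring intends.
def D_get_index_of_number_before_py (queue : List Int) (number : Int) : Prop :=
  queue.getLast? = some number
instance (queue : List Int) (number : Int) : Decidable (D_get_index_of_number_before_py queue number) := by unfold D_get_index_of_number_before_py; infer_instance

def Spec_get_index_of_number_before_py (queue : List Int) (number : Int) (out : Int) : Prop := ¬ D_get_index_of_number_before_py queue number → out = get_index_of_number_before_py_alt queue number
instance (queue : List Int) (number : Int) (out : Int) : Decidable (Spec_get_index_of_number_before_py queue number out) := by unfold Spec_get_index_of_number_before_py; infer_instance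

def pvDiffWitness_get_index_of_number_before_py : List Int × Int := ([1, 3, 5], 5)
def pvDiffWitnessOut_get_index_of_number_before_py : Int × Int := (-1, 2)

-- ===== CLAIM (what is proved, stated in full; the proofs are below) =====
def Claim_unchanged_get_index_of_number_before_py : Prop := ∀ (queue : List Int) (number : Int), Dom_get_index_of_number_before_py queue number → Pre_get_index_of_number_before_py queue number → Spec_get_index_of_number_before_py queue number (get_index_of_number_before_py queue number)
def Claim_changed_get_index_of_number_before_py : Prop := Dom_get_index_of_number_before_py (pvDiffWitness_get_index_of_number_before_py.1) (pvDiffWitness_get_index_of_number_before_py.2) ∧ Pre_get_index_of_number_before_py (pvDiffWitness_get_index_of_number_before_py.1) (pvDiffWitness_get_index_of_number_before_py.2) ∧ D_get_index_of_number_before_py (pvDiffWitness_get_index_of_number_before_py.1) (pvDiffWitness_get_index_of_number_before_py.2) ∧ get_index_of_number_before_py (pvDiffWitness_get_index_of_number_before_py.1) (pvDiffWitness_get_index_of_number_before_py.2) = pvDiffWitnessOut_get_index_of_number_before_py.1 ∧ get_index_of_number_before_py_alt (pvDiffWitness_get_index_of_number_before_py.1) (pvDiffWitness_get_index_of_number_before_py.2)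 = pvDiffWitnessOut_get_index_of_number_before_py.2 ∧ pvDiffWitnessOut_get_index_of_number_before_py.1 ≠ pvDiffWitnessOut_get_index_of_number_before_py.2
def Claim_exact_get_index_of_number_before_py : Prop := ∀ (queue : List Int) (number : Int), Dom_get_index_of_number_before_py queue number → Pre_get_index_of_number_before_py queue number → D_get_index_of_number_before_py queue number → get_index_of_number_before_py queue number ≠ get_index_of_number_before_py_alt queue number

-- ===== LEMMAS AND PROOFS =====

-- sortedness in getD form
theorem pv_sorted_getD (q : List Int) (hq : q.Pairwise (· ≤ ·)) :
    ∀ i j : Nat, i ≤ j → j < q.length → q.getD i 0 ≤ q.getD j 0 := by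
  intro i j hij hj
  rcases Nat.lt_or_ge i j with h | h
  · have hi : i < q.length := by omega
    have := (List.pairwise_iff_getElem.mp hq) i j hi hj h
    rw [List.getD_eq_getElem?_getD, List.getD_eq_getElem?_getD,
      List.getElem?_eq_getElem hi, List.getElem?_eq_getElem hj]
    simpa using this
  · have hij' : i = j := by omega
    rw [hij']

-- binary-search invariant: the result r separates "≤ number" (below r) from "> number" (from r on)
theorem pvBSearch_inv (q : List Int) (n : Int)
    (hs : ∀ i j : Nat, i ≤ j → j < q.length → q.getD i 0 ≤ q.getD j 0) :
    ∀ (lo hi : Nat), lo ≤ hi → hi ≤ q.length →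
      (∀ k, k < lo → q.getD k 0 ≤ n) →
      (∀ k, hi ≤ k → k < q.length → n < q.getD k 0) →
      (∀ k, k < pvBSearch q n lo hi → q.getD k 0 ≤ n) ∧
      (∀ k, pvBSearch q n lo hi ≤ k → k < q.length → n < q.getD k 0) ∧
      pvBSearch q n lo hi ≤ q.length := by
  intro lo hi
  induction hd : hi - lo using Nat.strong_induction_on generalizing lo hi with
  | _ d ih =>
    intro hle hhi hlow hhigh
    rw [pvBSearch]
    by_cases h : lo < hi
    · rw [dif_pos h]
      by_cases hc : n < q.getD ((lo + hi) / 2) 0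
      · rw [if_pos hc]
        exact ih ((lo + hi) / 2 - lo) (by omega) lo ((lo + hi) / 2) rfl (by omega) (by omega) hlow
          (fun k hk hk2 => lt_of_lt_of_le hc (hs _ k hk hk2))
      · rw [if_neg hc]
        exact ih (hi - ((lo + hi) / 2 + 1)) (by omega) ((lo + hi) / 2 + 1) hi rfl (by omega) hhi
          (fun k hk => le_trans (hs k _ (by omega) (by omega)) (not_lt.mp hc)) hhigh
    · rw [dif_neg h]
      exact ⟨hlow, fun k hk => hhigh k (by omega), by omega⟩

-- A's break-loop returns r - 1 when r (< len) is the separating index and the scan starts at i ≤ r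
theorem pvALoop_hits (q : List Int) (n : Int) (r : Nat)
    (h1 : ∀ k, k < r → q.getD k 0 ≤ n)
    (h2 : n < q.getD r 0) (hr : r < q.length) :
    ∀ i, i ≤ r → pvALoop q n i = (r : Int) - 1 := by
  intro i
  induction hd : r - i using Nat.strong_induction_on generalizing i with
  | _ d ih =>
    intro hir
    rw [pvALoop]
    have hil : i < q.length := by omega
    rw [dif_pos hil]
    by_cases hc : n < q.getD i 0
    · have hieq : i = r := by
        by_contra hne
        exact absurd hc (not_lt.mpr (h1 i (by omega)))
      rw [if_pos hc, hieq]
    · have hlt : i < r := by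
        rcases Nat.lt_or_ge i r with h | h
        · exact h
        · have : i = r := by omega
          exact absurd (this ▸ h2) hc
      rw [if_neg hc]
      exact ih (r - (i + 1)) (by omega) (i + 1) rfl hlt

-- A's break-loop returns -1 when no element exceeds n
theorem pvALoop_misses (q : List Int) (n : Int)
    (hall : ∀ k, k < q.length → q.getD k 0 ≤ n) :
    ∀ i, pvALoop q n i = -1 := by
  intro i
  induction hd : q.length - i using Nat.strong_induction_on generalizing i with
  | _ d ih =>
    rw [pvALoop]
    by_cases hil : i < q.length
    · rw [dif_pos hil, if_neg (not_lt.mpr (hall i hil))]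
      exact ih (q.length - (i + 1)) (by omega) (i + 1) rfl
    · rw [dif_neg hil]

-- getLast? of a non-empty list in getD form
theorem pv_getLast_getD (q : List Int) (h : q ≠ []) :
    q.getLast? = some (q.getD (q.length - 1) 0) := by
  have hl : 0 < q.length := List.length_pos_iff.mpr h
  rw [List.getLast?_eq_getElem?, List.getD_eq_getElem?_getD,
    List.getElem?_eq_getElem (by omega : q.length - 1 < q.length)]
  rfl

theorem pv_pyGet_zero (q : List Int) (h : q ≠ []) :
    (PySem.List.pyGet? q 0).getD 0 = q.getD 0 0 := by
  rw [PySem.List.pyGet?_zero, List.getD_eq_getElem?_getD]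

theorem pv_pyGet_last (q : List Int) (h : q ≠ []) :
    (PySem.List.pyGet? q (-1)).getD 0 = q.getD (q.length - 1) 0 := by
  rw [PySem.List.pyGet?_neg_one, pv_getLast_getD q h]
  rfl

-- the core equivalence / difference analysis, in one lemma
theorem pv_main (q : List Int) (n : Int) (hne : q ≠ []) (hq : q.Pairwise (· ≤ ·)) :
    (q.getLast? ≠ some n → get_index_of_number_before_py q n = get_index_of_number_before_py_alt q n) ∧
    (q.getLast? = some n → get_index_of_number_before_py q n = -1 ∧
      get_index_of_number_before_py_alt q n = (q.length : Int) - 1) := by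
  have hl : 0 < q.length := List.length_pos_iff.mpr hne
  have hs := pv_sorted_getD q hq
  obtain ⟨h1, h2, h3⟩ := pvBSearch_inv q n hs 0 q.length (by omega) le_rfl
    (by intro k hk; omega) (by intro k hk hk2; omega)
  set r := pvBSearch q n 0 q.length with hr
  have hlast := pv_getLast_getD q hne
  unfold get_index_of_number_before_py get_index_of_number_before_py_alt
  rw [pv_pyGet_zero q hne, pv_pyGet_last q hne, ← hr]
  constructor
  · intro hD
    have hne' : q.getD (q.length - 1) 0 ≠ n := fun he => hD (he ▸ hlast)
    by_cases hA : n < q.getD 0 0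
    · -- A = -1; r = 0
      have hr0 : r = 0 := by
        by_contra h0
        exact absurd (h1 0 (by omega)) (not_le.mpr hA)
      rw [if_pos hA, hr0]
      rfl
    · rw [if_neg hA]
      by_cases hB : n > q.getD (q.length - 1) 0
      · -- A = len-1; r = len
        have hrl : r = q.length := by
          rcases Nat.lt_or_ge r q.length with h | h
          · have := h2 (q.length - 1) (by omega) (by omega)
            omega
          · omega
        rw [if_pos hB, hrl]
      · -- else branch: q[0] ≤ n < q[len-1] (strict since ≠); r is the first exceeder
        rw [if_neg hB]
        have hnlt : n < q.getD (q.length - 1) 0 := by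
          rcases lt_or_eq_of_le (not_lt.mp hB) with h | h
          · exact h
          · exact absurd h.symm hne'
        have hrlt : r < q.length := by
          rcases Nat.lt_or_ge r q.length with h | h
          · exact h
          · exact absurd (h1 (q.length - 1) (by omega)) (not_le.mpr hnlt)
        exact pvALoop_hits q n r h1 (h2 r le_rfl hrlt) hrlt 0 (by omega)
  · intro hD
    have heq : q.getD (q.length - 1) 0 = n := by
      rw [hlast] at hD; exact Option.some.inj hD
    have hall : ∀ k, k < q.length → q.getD k 0 ≤ n :=
      fun k hk => heq ▸ hs k (q.length - 1) (by omega) (by omega)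
    have hA1 : ¬ n < q.getD 0 0 := not_lt.mpr (hall 0 hl)
    have hA2 : ¬ n > q.getD (q.length - 1) 0 := by omega
    have hrl : r = q.length := by
      rcases Nat.lt_or_ge r q.length with h | h
      · exact absurd (hall r h) (not_le.mpr (h2 r le_rfl h))
      · omega
    refine ⟨?_, ?_⟩
    · rw [if_neg hA1, if_neg hA2]
      exact pvALoop_misses q n hall 0
    · rw [hrl]

-- (helpers for the widened Pre_: order-independent regions where the two searches agree)
theorem pv_mem_getD (q : List Int) (k : Nat) (hk : k < q.length) : q.getD k 0 ∈ q := by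
  rw [List.getD_eq_getElem?_getD, List.getElem?_eq_getElem hk]
  exact List.getElem_mem hk

theorem pv_bs_all_lt (q : List Int) (n : Int) (hall : ∀ k, k < q.length → n < q.getD k 0) :
    ∀ lo hi, hi ≤ q.length → pvBSearch q n lo hi = lo := by
  intro lo hi
  induction hd : hi - lo using Nat.strong_induction_on generalizing lo hi with
  | _ d ih =>
    intro hhi
    rw [pvBSearch]
    by_cases h : lo < hi
    · rw [dif_pos h, if_pos (hall _ (by omega))]
      exact ih ((lo + hi) / 2 - lo) (by omega) lo ((lo + hi) / 2) rfl (by omega)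
    · rw [dif_neg h]

theorem pv_bs_all_le (q : List Int) (n : Int) (hall : ∀ k, k < q.length → q.getD k 0 ≤ n) :
    ∀ lo hi, hi ≤ q.length → pvBSearch q n lo hi = max lo hi := by
  intro lo hi
  induction hd : hi - lo using Nat.strong_induction_on generalizing lo hi with
  | _ d ih =>
    intro hhi
    rw [pvBSearch]
    by_cases h : lo < hi
    · rw [dif_pos h, if_neg (not_lt.mpr (hall _ (by omega)))]
      rw [ih (hi - ((lo + hi) / 2 + 1)) (by omega) ((lo + hi) / 2 + 1) hi rfl hhi]
      omega
    · rw [dif_neg h]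
      omega

-- the two order-independent Pre_ regions, handled without sortedness
theorem pv_region_lt (q : List Int) (n : Int) (hne : q ≠ [])
    (hall : ∀ x ∈ q, n < x) :
    get_index_of_number_before_py q n = get_index_of_number_before_py_alt q n := by
  have hl : 0 < q.length := List.length_pos_iff.mpr hne
  have hall' : ∀ k, k < q.length → n < q.getD k 0 := fun k hk => hall _ (pv_mem_getD q k hk)
  unfold get_index_of_number_before_py get_index_of_number_before_py_alt
  rw [pv_pyGet_zero q hne, if_pos (hall' 0 hl), pv_bs_all_lt q n hall' 0 q.length le_rfl]
  rfl

theorem pv_region_le (q : List Int) (n : Int) (hne : q ≠ [])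
    (hall : ∀ x ∈ q, x ≤ n) :
    (q.getLast? ≠ some n → get_index_of_number_before_py q n = get_index_of_number_before_py_alt q n) ∧
    (q.getLast? = some n → get_index_of_number_before_py q n = -1 ∧
      get_index_of_number_before_py_alt q n = (q.length : Int) - 1) := by
  have hl : 0 < q.length := List.length_pos_iff.mpr hne
  have hall' : ∀ k, k < q.length → q.getD k 0 ≤ n := fun k hk => hall _ (pv_mem_getD q k hk)
  have hlast := pv_getLast_getD q hne
  have hB : pvBSearch q n 0 q.length = q.length := by
    rw [pv_bs_all_le q n hall' 0 q.length le_rfl]; omega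
  unfold get_index_of_number_before_py get_index_of_number_before_py_alt
  rw [pv_pyGet_zero q hne, pv_pyGet_last q hne, if_neg (not_lt.mpr (hall' 0 hl)), hB]
  constructor
  · intro hD
    have hne' : q.getD (q.length - 1) 0 ≠ n := fun he => hD (he ▸ hlast)
    have : n > q.getD (q.length - 1) 0 :=
      lt_of_le_of_ne (hall' (q.length - 1) (by omega)) hne'
    rw [if_pos this]
  · intro hD
    have heq : q.getD (q.length - 1) 0 = n := by
      rw [hlast] at hD; exact Option.some.inj hD
    rw [if_neg (by omega : ¬ n > q.getD (q.length - 1) 0)]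
    exact ⟨pvALoop_misses q n hall' 0, rfl⟩

-- ===== VERDICT (by name: the statement is the Claim_ definition above) =====
theorem get_index_of_number_before_py_spec : Claim_unchanged_get_index_of_number_before_py := by
  intro queue number _ hpre hD
  rcases hpre with ⟨hne, hs | hlt | hle⟩
  · exact (pv_main queue number hne hs).1 hD
  · exact pv_region_lt queue number hne hlt
  · exact (pv_region_le queue number hne hle).1 hD

theorem get_index_of_number_before_py_changed : Claim_changed_get_index_of_number_before_py := by
  unfold Claim_changed_get_index_of_number_before_py
  refine ⟨by decide, by decide, by decide, ?_, ?_, by decide⟩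
  · show get_index_of_number_before_py [1, 3, 5] 5 = -1
    simp [get_index_of_number_before_py, pvALoop, PySem.List.pyGet?, PySem.List.pyIdx?]
  · show get_index_of_number_before_py_alt [1, 3, 5] 5 = 2
    simp [get_index_of_number_before_py_alt, pvBSearch]

theorem get_index_of_number_before_py_tight : Claim_exact_get_index_of_number_before_py := by
  intro queue number _ hpre hD
  have hl : 0 < queue.length := List.length_pos_iff.mpr hpre.1
  rcases hpre with ⟨hne, hs | hlt | hle⟩
  · obtain ⟨hA, hB⟩ := (pv_main queue number hne hs).2 hD
    rw [hA, hB]; omega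
  · -- number below every element contradicts number being the last element
    exfalso
    have := pv_getLast_getD queue hne
    rw [hD] at this
    have hmem := pv_mem_getD queue (queue.length - 1) (by omega)
    rw [(Option.some.inj this).symm] at hmem
    exact absurd (hlt _ hmem) (lt_irrefl number)
  · obtain ⟨hA, hB⟩ := (pv_region_le queue number hne hle).2 hD
    rw [hA, hB]; omega
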